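-- pv_equiv track=rewrite | github.com/GoldenStone02/PSEC-assignment | client/admin.py | check_user_input
-- ===== SOURCE A (Python) =====
-- def check_user_input(user_input: str, question_data: list) -> bool:
--     '''
--     This function checks if the user's selected option in inside the range of options.
--
--     Args:
--         user_input (str) : User's current input.
--         question_data (list) : List that will be used as reference.
--
--     Returns:
--         True or False.
--     '''
--     check_list = []
--     for i, option in enumerate(question_data):
--         check_list.extend(chr(97 + i))
--     for check in check_list:
--         if check == user_input.lower():
--             return True
--     return False
-- ===== SOURCE B (Python) =====
-- def check_user_input(user_input: str, question_data: list) -> bool: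
--     u = user_input.lower()
--     if len(u) != 1:
--         return False
--     return 0 <= ord(u) - 97 < len(question_data)
-- ===== Notes on version B (the rewrite author's own statement) =====
-- stated objective: simpler
-- what changed: Replaces building the list of option letters and linearly scanning it with a closed-form check: lowercase the input, require length 1, and test whether its code point minus 97 falls in [0, len(question_data)).
import Mathlib
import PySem

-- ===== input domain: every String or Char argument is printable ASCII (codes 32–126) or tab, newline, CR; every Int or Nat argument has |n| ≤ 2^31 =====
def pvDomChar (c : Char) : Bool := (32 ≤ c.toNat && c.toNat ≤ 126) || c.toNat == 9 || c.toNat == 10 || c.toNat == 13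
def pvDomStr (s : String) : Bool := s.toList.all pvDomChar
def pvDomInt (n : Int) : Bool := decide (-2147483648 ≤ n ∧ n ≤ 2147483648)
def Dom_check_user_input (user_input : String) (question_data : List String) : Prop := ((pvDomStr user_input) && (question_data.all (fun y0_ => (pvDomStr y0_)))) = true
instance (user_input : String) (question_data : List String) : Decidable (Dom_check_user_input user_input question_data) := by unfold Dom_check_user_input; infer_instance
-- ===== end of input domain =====

-- B replaces A's letter-list build-and-scan with a closed-form range check on the lowered input (objective: simpler).

-- ===== PORT A =====
-- check_list is built by extending with the 1-char string chr(97+i); the scan compares each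
-- single character (a 1-char string) with user_input.lower() and returns True on the first match.
def check_user_input (user_input : String) (question_data : List String) : Bool :=
  let check_list : List Char :=
    (PySem.List.enumerate question_data).foldl
      (fun acc p => acc ++ [Char.ofNat (97 + p.1).toNat]) []
  check_list.any (fun check => String.ofList [check] == PySem.Str.lower user_input)

-- ===== PORT B =====
def check_user_input_alt (user_input : String) (question_data : List String) : Bool :=
  match (PySem.Str.lower user_input).toList with
  | [c] => decide ((0:Int) ≤ (c.toNat : Int) - 97 ∧ (c.toNat : Int) - 97 < question_data.length)
  | _ => false

-- ===== PRECONDITION & SPEC =====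
-- Pre_ excludes only lists with more than 1114015 options, where A's chr(97 + i) raises
-- ValueError (codepoint above 0x10FFFF); A returns normally on every shorter input.
def Pre_check_user_input (user_input : String) (question_data : List String) : Prop :=
  question_data.length ≤ 1114015
instance (user_input : String) (question_data : List String) : Decidable (Pre_check_user_input user_input question_data) := by unfold Pre_check_user_input; infer_instance
def pvWitness_check_user_input : String × List String := ("a", ["option one"])
def Spec_check_user_input (user_input : String) (question_data : List String) (out : Bool) : Prop := out = check_user_input_alt user_input question_data
instance (user_input : String) (question_data : List String) (out : Bool) : Decidable (Spec_check_user_input user_input question_data out) := by unfold Spec_check_user_input; infer_instance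

-- ===== CLAIM (what is proved, stated in full; the proofs are below) =====
def Claim_equal_check_user_input : Prop := ∀ (user_input : String) (question_data : List String), Dom_check_user_input user_input question_data → Pre_check_user_input user_input question_data → Spec_check_user_input user_input question_data (check_user_input user_input question_data)

-- ===== LEMMAS AND PROOFS =====

lemma pv_beq_singleton (c : Char) (s : String) : (String.ofList [c] == s) = ([c] == s.toList) := by
  rw [Bool.eq_iff_iff, beq_iff_eq, beq_iff_eq]
  constructor
  · intro h; rw [← h]; simp
  · intro h; rw [h, String.ofList_toList]

lemma pv_toNat_ofNat {m : Nat} (h : m.isValidChar) : (Char.ofNat m).toNat = m := by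
  simp [Char.ofNat, h, Char.ofNatAux, Char.toNat, UInt32.toNat_ofNatLT]

lemma pv_toNat_ofNat_invalid {m : Nat} (h : ¬ m.isValidChar) : (Char.ofNat m).toNat = 0 := by
  simp [Char.ofNat, h, Char.toNat]

lemma pv_lowerChar_dom {c : Char} (h : pvDomChar c = true) :
    pvDomChar (PySem.Chars.lowerChar c) = true := by
  show pvDomChar (if PySem.Chars.isupper c then Char.ofNat (c.toNat + 32) else c) = true
  split_ifs with hu
  · have hb : (65 ≤ c.toNat && c.toNat ≤ 90) = true := hu
    simp at hb
    have hv : (c.toNat + 32).isValidChar := Or.inl (by omega)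
    simp [pvDomChar, pv_toNat_ofNat hv]; omega
  · exact h

-- ===== VERDICT (by name: the statement is the Claim_ definition above) =====
theorem check_user_input_spec : Claim_equal_check_user_input := by
  intro u qd hdom _hpre
  unfold Spec_check_user_input
  -- every character of the lowered input stays in the printable-ASCII domain
  have hdomu : ∀ c ∈ (PySem.Str.lower u).toList, pvDomChar c = true := by
    intro c hc
    have hmap : (PySem.Str.lower u).toList = u.toList.map PySem.Chars.lowerChar := by
      simp [PySem.Str.toList_lower]; rfl
    rw [hmap] at hc
    obtain ⟨d, hd, rfl⟩ := List.mem_map.1 hc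
    have hdall : pvDomChar d = true := by
      unfold Dom_check_user_input at hdom
      simp [pvDomStr, List.all_eq_true] at hdom
      exact hdom.1 d hd
    exact pv_lowerChar_dom hdall
  -- A's scan, rewritten as an `any` over the enumerated indices
  have hA : check_user_input u qd
      = (PySem.List.enumerate qd).any
          (fun p => [Char.ofNat (97 + p.1).toNat] == (PySem.Str.lower u).toList) := by
    unfold check_user_input
    rw [PySem.List.foldl_append_singleton_eq_map]
    simp only [List.nil_append, List.any_map, pv_beq_singleton, PySem.Str.toList_lower]
    rfl
  rcases hL : (PySem.Str.lower u).toList with - | ⟨c, rest⟩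
  · simp [hA, hL, check_user_input_alt]
  rcases rest with - | ⟨d, rest'⟩
  · -- lowered input is the single character c
    have hc : pvDomChar c = true := hdomu c (by rw [hL]; exact List.mem_singleton_self c)
    have hcb : c.toNat ≤ 126 ∧ 9 ≤ c.toNat := by
      simp [pvDomChar] at hc; omega
    rw [hA, hL]
    unfold check_user_input_alt
    rw [hL]
    rw [Bool.eq_iff_iff]
    simp only [List.any_eq_true, PySem.List.mem_enumerate_iff, decide_eq_true_eq, beq_iff_eq]
    constructor
    · rintro ⟨p, ⟨k, hk, rfl⟩, hpe⟩
      have hnat : ((97 : Int) + ((0 : Int) + k)).toNat = 97 + k := by omega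
      rw [hnat] at hpe
      have hco : Char.ofNat (97 + k) = c := by
        simpa using hpe
      by_cases hv : (97 + k).isValidChar
      · have : c.toNat = 97 + k := by rw [← hco, pv_toNat_ofNat hv]
        omega
      · have : c.toNat = 0 := by rw [← hco, pv_toNat_ofNat_invalid hv]
        omega
    · rintro ⟨h1, h2⟩
      have hb1 : 97 ≤ c.toNat := by omega
      have hb2 : c.toNat - 97 < qd.length := by omega
      refine ⟨((0 : Int) + (c.toNat - 97 : Nat), qd[c.toNat - 97]), ⟨c.toNat - 97, hb2, rfl⟩, ?_⟩
      have hnat : ((97 : Int) + ((0 : Int) + (c.toNat - 97 : Nat))).toNat = c.toNat := by omega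
      rw [hnat]
      have hv : (c.toNat).isValidChar := Or.inl (by omega)
      simp [Char.ofNat_toNat]
  · -- lowered input has at least two characters: both sides are false
    simp [hA, hL, check_user_input_alt]
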